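-- pv_equiv track=rewrite | github.com/SSAFY-Python-Study/Pystudy | 백준/Silver/12927. 배수 스위치/배수 스위치.py | click
-- ===== SOURCE A (Python) =====
-- def click(arr):
--     count = 0
--     for i in range(1, len(arr)):
--         if arr[i] == 'Y':
--             for j in range(1, len(arr)):
--                 if j % i == 0:
--                     if arr[j] == 'Y':
--                         arr[j] = 'N'
--                     else:
--                         arr[j] = 'Y'
--             count += 1
--         if 'Y' not in arr:
--             return count
--     return -1
-- ===== SOURCE B (Python) =====
-- def click(arr):
--     # Boolean states; the inner loop visits only the multiples of i (range(i, n, i)).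
--     n = len(arr)
--     state = [x == 'Y' for x in arr]
--     count = 0
--     for i in range(1, n):
--         if state[i]:
--             for j in range(i, n, i):
--                 state[j] = not state[j]
--             count += 1
--         if not any(state):
--             return count
--     return -1
-- ===== Notes on version B (the rewrite author's own statement) =====
-- stated objective: alternative
-- what changed: B keeps boolean on/off states and the inner toggle visits only the multiples of i via range(i, n, i) instead of scanning every j in range(1, n) and testing j % i == 0; B does not mutate its argument.
import Mathlib
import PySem

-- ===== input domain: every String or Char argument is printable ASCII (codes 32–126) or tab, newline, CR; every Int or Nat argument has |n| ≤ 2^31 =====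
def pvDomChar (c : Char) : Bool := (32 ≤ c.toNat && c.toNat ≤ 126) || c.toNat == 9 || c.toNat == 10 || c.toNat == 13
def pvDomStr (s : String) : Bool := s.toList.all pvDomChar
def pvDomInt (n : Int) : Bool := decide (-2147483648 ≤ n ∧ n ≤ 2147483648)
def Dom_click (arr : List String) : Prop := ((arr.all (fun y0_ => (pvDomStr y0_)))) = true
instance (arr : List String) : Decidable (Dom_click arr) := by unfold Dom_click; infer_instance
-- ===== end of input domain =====

-- B keeps boolean on/off states and its inner loop visits only the multiples of i
-- (range(i, n, i)) instead of scanning every j and testing j % i == 0; equivalence is about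
-- the RETURN value only — A mutates its argument in place, B does not.

-- ===== PORT A =====
-- inner loop 'for j in range(1, len(arr)): if j % i == 0: toggle arr[j]'
def clickToggle (arr : List String) (i : Int) : List String :=
  (PySem.List.pyRange 1 (arr.length : Int) 1).foldl
    (fun a j =>
      if PySem.Int.mod j i == 0 then
        if PySem.List.pyGetD a j "" == "Y" then PySem.List.pySetD a j "N"
        else PySem.List.pySetD a j "Y"
      else a) arr

-- outer loop with early return; indices i are in range, so pyGetD is exact here
def clickLoop : List Int → List String → Int → Int
  | [], _, _ => -1
  | i :: rest, arr, count =>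
      let p := if PySem.List.pyGetD arr i "" == "Y" then (clickToggle arr i, count + 1)
               else (arr, count)
      if p.1.contains "Y" then clickLoop rest p.1 p.2 else p.2

def click (arr : List String) : Int :=
  clickLoop (PySem.List.pyRange 1 (arr.length : Int) 1) arr 0

-- ===== PORT B =====
-- inner loop 'for j in range(i, n, i): state[j] = not state[j]'
def flipMuls (st : List Bool) (n i : Int) : List Bool :=
  (PySem.List.pyRange i n i).foldl
    (fun s j => PySem.List.pySetD s j (!(PySem.List.pyGetD s j false))) st

def clickAltLoop : Int → List Int → List Bool → Int → Int
  | _, [], _, _ => -1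
  | n, i :: rest, st, count =>
      let p := if PySem.List.pyGetD st i false then (flipMuls st n i, count + 1)
               else (st, count)
      if p.1.any id then clickAltLoop n rest p.1 p.2 else p.2

def click_alt (arr : List String) : Int :=
  let n : Int := arr.length
  let st := arr.map (fun x => x == "Y")
  clickAltLoop n (PySem.List.pyRange 1 n 1) st 0

-- ===== PRECONDITION & SPEC =====
def Spec_click (arr : List String) (out : Int) : Prop := out = click_alt arr
instance (arr : List String) (out : Int) : Decidable (Spec_click arr out) := by unfold Spec_click; infer_instance

-- ===== CLAIM (what is proved, stated in full; the proofs are below) =====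
def Claim_equal_click : Prop := ∀ (arr : List String), Dom_click arr → Spec_click arr (click arr)

-- ===== LEMMAS AND PROOFS =====

-- the toggled string: 'Y' -> 'N', anything else -> 'Y'
def tS (x : String) : String := if x == "Y" then "N" else "Y"

theorem pv_mod_eq_zero_iff (i j : Int) (h : 0 < i) : (PySem.Int.mod j i == 0) = true ↔ i ∣ j := by
  simp only [PySem.Int.mod, beq_iff_eq]
  rw [Int.fmod_eq_emod (b := i), if_pos (Or.inl (by omega : (0:Int) ≤ i)), add_zero]
  exact ⟨fun hz => Int.dvd_of_emod_eq_zero hz, fun hd => Int.emod_eq_zero_of_dvd hd⟩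

theorem pv_nodup_pyRange (a b s : Int) (h : 0 < s) : (PySem.List.pyRange a b s).Nodup := by
  rw [PySem.List.pyRange_of_pos a b h]
  refine List.Nodup.map ?_ (List.nodup_range)
  intro x y hxy
  have h2 : s * (x:Int) = s * y := by linarith
  have h3 := mul_left_cancel₀ (by omega : s ≠ 0) h2
  exact_mod_cast h3

-- a fold of in-place updates at distinct nonnegative indices, described pointwise
theorem pv_fold_set_getElem? {α : Type} (f : α → α) (d : α) :
    ∀ (l : List Int) (s : List α) (k : Nat), (∀ j ∈ l, 0 ≤ j) → l.Nodup →
      (l.foldl (fun s j => PySem.List.pySetD s j (f (PySem.List.pyGetD s j d))) s)[k]? =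
        if (k : Int) ∈ l then s[k]?.map f else s[k]? := by
  intro l
  induction l with
  | nil => intro s k _ _; simp
  | cons j t ih =>
    intro s k h0 hnd
    have hj : 0 ≤ j := h0 j (List.mem_cons_self ..)
    have hstep : PySem.List.pySetD s j (f (PySem.List.pyGetD s j d))
        = s.set j.toNat (f (s.getD j.toNat d)) := by
      rw [PySem.List.pySetD_of_nonneg s _ hj, PySem.List.pyGetD_of_nonneg s d hj]
    rw [List.foldl_cons, hstep,
        ih _ k (fun x hx => h0 x (List.mem_cons_of_mem _ hx)) (List.Nodup.of_cons hnd)]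
    by_cases hk : (k : Int) = j
    · have hk' : j.toNat = k := by omega
      have hknt : (k : Int) ∉ t := by rw [hk]; exact (List.nodup_cons.1 hnd).1
      rw [if_neg hknt, if_pos (by rw [hk]; exact List.mem_cons_self ..), hk']
      by_cases hlt : k < s.length
      · rw [List.getElem?_set_self' ]
        simp [hlt, List.getD_eq_getElem?_getD]
      · rw [List.set_eq_of_length_le (by omega)]
        simp [List.getElem?_eq_none (by omega : s.length ≤ k)]
    · have hne : j.toNat ≠ k := by omega
      rw [List.getElem?_set_ne hne]
      by_cases hm : (k : Int) ∈ t
      · rw [if_pos hm, if_pos (List.mem_cons_of_mem _ hm)]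
      · rw [if_neg hm, if_neg (by simp [List.mem_cons, hk, hm])]

theorem pv_fold_set_length {α : Type} (f : α → α) (d : α) :
    ∀ (l : List Int) (s : List α),
      (l.foldl (fun s j => PySem.List.pySetD s j (f (PySem.List.pyGetD s j d))) s).length = s.length := by
  intro l
  induction l with
  | nil => intro s; rfl
  | cons j t ih => intro s; rw [List.foldl_cons, ih]; exact PySem.List.length_pySetD ..

-- A's inner loop as a fold of unconditional writes over the filtered index list
theorem clickToggle_eq (arr : List String) (i : Int) :
    clickToggle arr i =
      ((PySem.List.pyRange 1 (arr.length : Int) 1).filter (fun j => PySem.Int.mod j i == 0)).foldl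
        (fun a j => PySem.List.pySetD a j (tS (PySem.List.pyGetD a j ""))) arr := by
  unfold clickToggle
  rw [show (fun (a : List String) (j : Int) =>
        if PySem.Int.mod j i == 0 then
          if PySem.List.pyGetD a j "" == "Y" then PySem.List.pySetD a j "N"
          else PySem.List.pySetD a j "Y"
        else a)
      = (fun a j => if PySem.Int.mod j i == 0 then
          PySem.List.pySetD a j (tS (PySem.List.pyGetD a j "")) else a) from by
    funext a j
    by_cases h : (PySem.List.pyGetD a j "" == "Y") = true <;> simp [tS, h]]
  exact PySem.List.foldl_if_eq_foldl_filter _ _ _ _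

-- the two inner loops write to the same index set: multiples of i in [1, n)
theorem pv_mem_idx (i n k : Int) (hi : 1 ≤ i) :
    (k ∈ (PySem.List.pyRange 1 n 1).filter (fun j => PySem.Int.mod j i == 0))
      ↔ k ∈ PySem.List.pyRange i n i := by
  rw [List.mem_filter, PySem.List.mem_pyRange_one, PySem.List.mem_pyRange_iff_of_pos (by omega)]
  rw [pv_mod_eq_zero_iff i k (by omega)]
  constructor
  · rintro ⟨⟨h1, h2⟩, hd⟩
    exact ⟨Int.le_of_dvd (by omega) hd, h2, dvd_sub hd (dvd_refl i)⟩
  · rintro ⟨h1, h2, hd⟩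
    have : i ∣ k := by
      have := dvd_add hd (dvd_refl i); simpa using this
    exact ⟨⟨by omega, h2⟩, this⟩

theorem pv_e_tS (x : String) : ((tS x) == "Y") = !(x == "Y") := by
  by_cases h : (x == "Y") = true <;> simp [tS, h]

theorem toggle_map (arr : List String) (i : Int) (hi : 1 ≤ i) :
    (clickToggle arr i).map (fun x => x == "Y")
      = flipMuls (arr.map (fun x => x == "Y")) (arr.length : Int) i := by
  apply List.ext_getElem?
  intro k
  have hA0 : ∀ j ∈ (PySem.List.pyRange 1 (arr.length : Int) 1).filter
      (fun j => PySem.Int.mod j i == 0), 0 ≤ j := by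
    intro j hj
    have := (List.mem_filter.1 hj).1
    have := (PySem.List.mem_pyRange_one.1 this).1
    omega
  have hAnd : ((PySem.List.pyRange 1 (arr.length : Int) 1).filter
      (fun j => PySem.Int.mod j i == 0)).Nodup :=
    (PySem.List.nodup_pyRange_one ..).filter _
  have hB0 : ∀ j ∈ PySem.List.pyRange i (arr.length : Int) i, 0 ≤ j := by
    intro j hj
    have := ((PySem.List.mem_pyRange_iff_of_pos (by omega : (0:Int) < i) j).1 hj).1
    omega
  have hBnd : (PySem.List.pyRange i (arr.length : Int) i).Nodup :=
    pv_nodup_pyRange _ _ _ (by omega)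
  rw [List.getElem?_map, clickToggle_eq]
  unfold flipMuls
  rw [pv_fold_set_getElem? tS "" _ arr k hA0 hAnd,
      pv_fold_set_getElem? (fun b => !b) false _ _ k hB0 hBnd]
  by_cases hm : (k : Int) ∈ PySem.List.pyRange i (arr.length : Int) i
  · rw [if_pos ((pv_mem_idx i _ _ hi).2 hm), if_pos hm, List.getElem?_map,
        Option.map_map, Option.map_map]
    congr 1
    funext x
    exact pv_e_tS x
  · rw [if_neg (fun hc => hm ((pv_mem_idx i _ _ hi).1 hc)), if_neg hm, List.getElem?_map]

theorem pv_pyGetD_mapE (arr : List String) (i : Int) :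
    PySem.List.pyGetD (arr.map (fun x => x == "Y")) i false
      = (PySem.List.pyGetD arr i "" == "Y") := by
  have h := PySem.List.pyGetD_map (f := fun x => x == "Y") (xs := arr) (i := i) (d := "")
  simpa using h

theorem pv_any_mapE (xs : List String) :
    (xs.map (fun x => x == "Y")).any id = xs.contains "Y" := by
  simp only [List.any_map, Function.comp_def, id]
  rw [List.any_beq']

theorem pv_clickToggle_length (arr : List String) (i : Int) :
    (clickToggle arr i).length = arr.length := by
  rw [clickToggle_eq]; exact pv_fold_set_length tS "" _ arr

theorem loop_eq (n : Int) (l : List Int) :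
    ∀ (arr : List String) (count : Int),
      (arr.length : Int) = n → (∀ j ∈ l, 1 ≤ j) →
      clickLoop l arr count = clickAltLoop n l (arr.map (fun x => x == "Y")) count := by
  induction l with
  | nil => intro arr count _ _; rfl
  | cons i t ih =>
    intro arr count hlen hpos
    have hi : 1 ≤ i := hpos i (List.mem_cons_self ..)
    simp only [clickLoop, clickAltLoop]
    rw [pv_pyGetD_mapE]
    by_cases hc : (PySem.List.pyGetD arr i "" == "Y") = true
    · rw [if_pos hc, if_pos hc]
      have hmap : (clickToggle arr i).map (fun x => x == "Y")
          = flipMuls (arr.map (fun x => x == "Y")) n i := by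
        rw [toggle_map arr i hi, hlen]
      rw [← hmap, pv_any_mapE]
      by_cases hg : ((clickToggle arr i).contains "Y") = true
      · rw [if_pos hg, if_pos hg]
        exact ih (clickToggle arr i) (count + 1)
          (by rw [pv_clickToggle_length]; exact hlen)
          (fun j hj => hpos j (List.mem_cons_of_mem _ hj))
      · rw [if_neg hg, if_neg hg]
    · rw [if_neg hc, if_neg hc, pv_any_mapE]
      by_cases hg : (arr.contains "Y") = true
      · rw [if_pos hg, if_pos hg]
        exact ih arr count hlen (fun j hj => hpos j (List.mem_cons_of_mem _ hj))
      · rw [if_neg hg, if_neg hg]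

-- ===== VERDICT (by name: the statement is the Claim_ definition above) =====
theorem click_spec : Claim_equal_click := by
  intro arr _
  unfold Spec_click click click_alt
  exact loop_eq (arr.length : Int) _ arr 0 rfl
    (fun j hj => (PySem.List.mem_pyRange_one.1 hj).1)
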